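-- pv_equiv track=rewrite | github.com/rsotelo14/pygame-chess | functions/functions.py | remove_characters_until_two_spaces
-- ===== SOURCE A (Python) =====
-- def remove_characters_until_two_spaces(string):
--     count = 0
--     index = len(string) - 1
--
--     while index >= 0 and count < 2:
--         if string[index] == ' ':
--             count += 1
--         index -= 1
--
--     if count == 2:
--         return string[:index + 1]
--     else:
--         return string
-- ===== SOURCE B (Python) =====
-- def remove_characters_until_two_spaces(string):
--     parts = string.split(' ')
--     if len(parts) < 3:
--         return string
--     return ' '.join(parts[:-2])
-- ===== Notes on version B (the rewrite author's own statement) =====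
-- stated objective: simpler
-- what changed: Replaces A's backward character-by-character counting scan with a forward partition: split the whole string on the single-space separator and rebuild the answer by joining all pieces except the last two (fewer than three pieces means fewer than two spaces, so the string is returned unchanged).
import Mathlib
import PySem

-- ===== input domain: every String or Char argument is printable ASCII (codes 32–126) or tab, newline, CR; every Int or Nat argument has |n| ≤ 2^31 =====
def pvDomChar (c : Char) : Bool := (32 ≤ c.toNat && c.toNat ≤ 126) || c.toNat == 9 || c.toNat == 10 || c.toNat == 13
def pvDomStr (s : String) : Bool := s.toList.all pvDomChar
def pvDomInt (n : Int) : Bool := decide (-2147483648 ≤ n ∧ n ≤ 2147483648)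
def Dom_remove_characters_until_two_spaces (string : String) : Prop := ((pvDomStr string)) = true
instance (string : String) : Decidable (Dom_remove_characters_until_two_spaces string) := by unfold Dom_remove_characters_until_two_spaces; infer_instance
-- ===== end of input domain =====

-- B replaces A's backward character scan by a forward split on ' ' plus a join of all
-- pieces except the last two (objective: simpler).

-- ===== PORT A =====
-- while index >= 0 and count < 2: if string[index] == ' ': count += 1; index -= 1
-- (string[index] is always in range inside the loop, so pyGetD's default is never used)
def pvLoopA (cs : List Char) (count : Int) (index : Int) : Int × Int :=
  if index ≥ 0 ∧ count < 2 then
    pvLoopA cs (if PySem.List.pyGetD cs index ' ' == ' ' then count + 1 else count) (index - 1)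
  else (count, index)
termination_by (index + 1).toNat
decreasing_by omega

def remove_characters_until_two_spaces (string : String) : String :=
  let r := pvLoopA string.toList 0 (PySem.Str.len string - 1)
  if r.1 = 2 then PySem.Str.slice string none (some (r.2 + 1)) else string

-- ===== PORT B =====
-- parts = string.split(' ')  (sep ≠ '', so Chars.splitOn is the exact form);
-- if len(parts) < 3: return string;  return ' '.join(parts[:-2])
def remove_characters_until_two_spaces_alt (string : String) : String :=
  let parts := (PySem.Chars.splitOn string.toList " ".toList).map String.ofList
  if parts.length < 3 then string
  else PySem.Str.join " " (PySem.List.slice parts none (some (-2)))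

-- ===== PRECONDITION & SPEC =====
def Spec_remove_characters_until_two_spaces (string : String) (out : String) : Prop := out = remove_characters_until_two_spaces_alt string
instance (string : String) (out : String) : Decidable (Spec_remove_characters_until_two_spaces string out) := by unfold Spec_remove_characters_until_two_spaces; infer_instance

-- ===== CLAIM (what is proved, stated in full; the proofs are below) =====
def Claim_equal_remove_characters_until_two_spaces : Prop := ∀ (string : String), Dom_remove_characters_until_two_spaces string → Spec_remove_characters_until_two_spaces string (remove_characters_until_two_spaces string)

-- ===== LEMMAS AND PROOFS =====

-- last space index strictly below j, −1 if none
def pvLsb (cs : List Char) : Nat → Int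
  | 0 => -1
  | j + 1 => if cs[j]? = some ' ' then (j : Int) else pvLsb cs j

theorem pvLsb_take (cs : List Char) (L : Nat) : ∀ j, j ≤ L → pvLsb (cs.take L) j = pvLsb cs j := by
  intro j hj
  induction j with
  | zero => rfl
  | succ j ih =>
    unfold pvLsb
    rw [List.getElem?_take_of_lt (by omega), ih (by omega)]

-- skip over a span with no space
theorem pvLsb_skip (cs : List Char) (a : Nat) : ∀ b, a ≤ b →
    (∀ i, a ≤ i → i < b → cs[i]? ≠ some ' ') → pvLsb cs b = pvLsb cs a := by
  intro b
  induction b with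
  | zero => intro h _; have ha : a = 0 := by omega
            rw [ha]
  | succ j ih =>
    intro hab h
    by_cases hja : a = j + 1
    · rw [hja]
    · have haj : a ≤ j := by omega
      conv_lhs => rw [pvLsb]
      rw [if_neg (h j haj (by omega)), ih haj (fun i h1 h2 => h i h1 (by omega))]

theorem pvLsb_no_space (cs : List Char) (h : ' ' ∉ cs) (j : Nat) : pvLsb cs j = -1 := by
  have := pvLsb_skip cs 0 j (Nat.zero_le j) (by
    intro i _ _ hget
    exact h (List.mem_of_getElem? hget))
  rw [this]; rfl

-- the last space of u ++ ' ' :: v with v space-free sits at index u.length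
theorem pvLsb_boundary (u v : List Char) (hv : ' ' ∉ v) :
    pvLsb (u ++ ' ' :: v) (u.length + 1 + v.length) = u.length := by
  have hskip : pvLsb (u ++ ' ' :: v) (u.length + 1 + v.length) = pvLsb (u ++ ' ' :: v) (u.length + 1) := by
    apply pvLsb_skip _ _ _ (by omega)
    intro i h1 h2 hget
    have hi : (u ++ ' ' :: v)[i]? = (' ' :: v)[i - u.length]? := by
      rw [List.getElem?_append_right (by omega)]
    have hpos : 0 < i - u.length := by omega
    obtain ⟨k, hk⟩ : ∃ k, i - u.length = k + 1 := ⟨i - u.length - 1, by omega⟩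
    rw [hi, hk] at hget
    simp only [List.getElem?_cons_succ] at hget
    exact hv (List.mem_of_getElem? hget)
  rw [hskip]
  have hget : (u ++ ' ' :: v)[u.length]? = some ' ' := by
    rw [List.getElem?_append_right (le_refl _)]
    simp
  show (if (u ++ ' ' :: v)[u.length]? = some ' ' then ((u.length : Int)) else pvLsb (u ++ ' ' :: v) u.length) = u.length
  rw [if_pos hget]

theorem pv_loop_one (cs : List Char) : ∀ j : Nat, j ≤ cs.length →
    pvLoopA cs 1 ((j : Int) - 1) =
      if pvLsb cs j = -1 then (1, -1) else (2, pvLsb cs j - 1) := by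
  intro j
  induction j with
  | zero => intro _; unfold pvLoopA pvLsb; norm_num
  | succ j ih =>
    intro h
    have hj : j < cs.length := by omega
    have hidx : ((j + 1 : Nat) : Int) - 1 = (j : Int) := by push_cast; ring
    rw [hidx]
    unfold pvLoopA
    rw [if_pos (by constructor <;> omega)]
    have hget : PySem.List.pyGetD cs (j : Int) ' ' = cs[j] := by
      rw [PySem.List.pyGetD_natCast]
      exact List.getD_eq_getElem cs ' ' hj
    by_cases hsp : cs[j] = ' '
    · have : pvLsb cs (j + 1) = (j : Int) := by unfold pvLsb; simp [List.getElem?_eq_getElem hj, hsp]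
      rw [hget]
      simp only [hsp, beq_self_eq_true, if_true]
      unfold pvLoopA
      rw [if_neg (by omega)]
      simp [this]
    · have hne : cs[j]? ≠ some ' ' := by simp [List.getElem?_eq_getElem hj, hsp]
      have : pvLsb cs (j + 1) = pvLsb cs j := by
        conv_lhs => rw [pvLsb]
        rw [if_neg hne]
      rw [hget]
      have hb : (cs[j] == ' ') = false := by simp [hsp]
      rw [hb]
      simp only [this]
      exact ih (by omega)

theorem pv_loop_zero (cs : List Char) : ∀ j : Nat, j ≤ cs.length →
    pvLoopA cs 0 ((j : Int) - 1) =
      if h : pvLsb cs j = -1 then (0, -1)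
      else if pvLsb cs (pvLsb cs j).toNat = -1 then (1, -1)
      else (2, pvLsb cs (pvLsb cs j).toNat - 1) := by
  intro j
  induction j with
  | zero => intro _; unfold pvLoopA pvLsb; norm_num
  | succ j ih =>
    intro h
    have hj : j < cs.length := by omega
    have hidx : ((j + 1 : Nat) : Int) - 1 = (j : Int) := by push_cast; ring
    rw [hidx]
    unfold pvLoopA
    rw [if_pos (by constructor <;> omega)]
    have hget : PySem.List.pyGetD cs (j : Int) ' ' = cs[j] := by
      rw [PySem.List.pyGetD_natCast]
      exact List.getD_eq_getElem cs ' ' hj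
    by_cases hsp : cs[j] = ' '
    · have hl : pvLsb cs (j + 1) = (j : Int) := by unfold pvLsb; simp [List.getElem?_eq_getElem hj, hsp]
      rw [hget]
      simp only [hsp, beq_self_eq_true, if_true]
      have h1 := pv_loop_one cs j (by omega)
      rw [show (0 : Int) + 1 = 1 by norm_num, h1]
      rw [dif_neg (by rw [hl]; omega)]
      simp [hl]
    · have hne : cs[j]? ≠ some ' ' := by simp [List.getElem?_eq_getElem hj, hsp]
      have hl : pvLsb cs (j + 1) = pvLsb cs j := by
        conv_lhs => rw [pvLsb]
        rw [if_neg hne]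
      rw [hget]
      have hb : (cs[j] == ' ') = false := by simp [hsp]
      rw [hb]
      simp only [hl]
      exact ih (by omega)

-- ---- B side: characterisation of splitOn on a single space ----

-- reference split: cs split at every ' ', forward structural recursion
def pvSplit : List Char → List (List Char)
  | [] => [[]]
  | c :: rest => if c = ' ' then [] :: pvSplit rest
                 else (c :: (pvSplit rest).headI) :: (pvSplit rest).tail

theorem pvSplit_ne_nil (cs : List Char) : pvSplit cs ≠ [] := by
  cases cs with
  | nil => simp [pvSplit]
  | cons c rest => unfold pvSplit; split <;> simp

theorem pvSplit_cons' (cs : List Char) : pvSplit cs = (pvSplit cs).headI :: (pvSplit cs).tail := by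
  cases h : pvSplit cs with
  | nil => exact absurd h (pvSplit_ne_nil cs)
  | cons a t => rfl

theorem pvSplitOn_go (fuel : Nat) : ∀ (l cur : List Char) (acc : List (List Char)),
    l.length < fuel →
    PySem.Chars.splitOn.go [' '] fuel l cur acc =
      acc.reverse ++ (cur.reverse ++ (pvSplit l).headI) :: (pvSplit l).tail := by
  induction fuel with
  | zero => intro l _ _ h; omega
  | succ f ih =>
    intro l cur acc h
    cases l with
    | nil =>
      unfold PySem.Chars.splitOn.go
      simp [pvSplit]
    | cons c rest =>
      unfold PySem.Chars.splitOn.go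
      by_cases hc : c = ' '
      · rw [if_pos (by simp [List.isPrefixOf, hc])]
        rw [show List.drop ([' '] : List Char).length (c :: rest) = rest from rfl]
        rw [ih rest [] (cur.reverse :: acc) (by simp at h ⊢; omega)]
        simp only [pvSplit, if_pos hc, List.headI, List.tail]
        rw [pvSplit_cons' rest]
        simp
      · rw [if_neg (by simp [List.isPrefixOf]; exact fun hh => hc hh.symm)]
        rw [ih rest (c :: cur) acc (by simp at h ⊢; omega)]
        simp [pvSplit, hc]

theorem pvSplitOn_eq (cs : List Char) : PySem.Chars.splitOn cs [' '] = pvSplit cs := by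
  unfold PySem.Chars.splitOn
  rw [pvSplitOn_go (cs.length + 1) cs [] [] (by omega)]
  simp [← pvSplit_cons']

theorem pvSplit_join (cs : List Char) : PySem.Chars.join [' '] (pvSplit cs) = cs := by
  induction cs with
  | nil => simp [pvSplit, PySem.Chars.join, List.intercalate]
  | cons c rest ih =>
    unfold pvSplit
    by_cases hc : c = ' '
    · rw [if_pos hc]
      rw [pvSplit_cons' rest] at ih ⊢
      rw [PySem.Chars.join_cons_cons]
      simp [hc, ih]
    · rw [if_neg hc]
      rw [pvSplit_cons' rest] at ih
      cases ht : (pvSplit rest).tail with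
      | nil =>
        rw [ht] at ih
        rw [PySem.Chars.join_singleton] at ih ⊢
        rw [ih]
      | cons q qs =>
        rw [ht] at ih
        rw [PySem.Chars.join_cons_cons] at ih ⊢
        simp [ih]

theorem pvSplit_no_space (cs : List Char) : ∀ p ∈ pvSplit cs, ' ' ∉ p := by
  induction cs with
  | nil => simp [pvSplit]
  | cons c rest ih =>
    unfold pvSplit
    by_cases hc : c = ' '
    · rw [if_pos hc]
      intro p hp
      rcases List.mem_cons.mp hp with hp1 | hp1
      · simp [hp1]
      · exact ih p hp1
    · rw [if_neg hc]
      intro p hp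
      rcases List.mem_cons.mp hp with hp1 | hp1
      · subst hp1
        intro hmem
        rcases List.mem_cons.mp hmem with h | h
        · exact hc h.symm
        · exact ih _ (by rw [pvSplit_cons' rest]; exact List.mem_cons_self) h
      · exact ih p (by rw [pvSplit_cons' rest]; exact List.mem_cons_of_mem _ hp1)

-- slice xs none (some (-2)) drops the last two elements
theorem pv_slice_neg2 {α : Type} (xs : List α) (h : 2 ≤ xs.length) :
    PySem.List.slice xs none (some (-2)) = xs.take (xs.length - 2) := by
  show List.take ((PySem.List.clampIdx xs.length (-2) : Int) - 0).toNat (List.drop 0 xs) = _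
  unfold PySem.List.clampIdx
  rw [if_pos (by omega), if_neg (by omega)]
  simp only [List.drop_zero]
  congr 1
  omega

theorem pv_join_append2 (q : List (List Char)) (y z : List Char) (hq : q ≠ []) :
    PySem.Chars.join [' '] (q ++ [y, z]) = PySem.Chars.join [' '] q ++ ' ' :: (y ++ ' ' :: z) := by
  induction q with
  | nil => exact absurd rfl hq
  | cons a q ih =>
    cases q with
    | nil =>
      rw [show ([a] : List (List Char)) ++ [y, z] = [a, y, z] from rfl]
      rw [PySem.Chars.join_cons_cons, PySem.Chars.join_cons_cons,
          PySem.Chars.join_singleton, PySem.Chars.join_singleton]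
      simp
    | cons b q' =>
      rw [show (a :: b :: q') ++ [y, z] = a :: ((b :: q') ++ [y, z]) from rfl]
      rw [show ((b :: q') ++ [y, z] : List (List Char)) = b :: (q' ++ [y, z]) from rfl]
      rw [PySem.Chars.join_cons_cons]
      rw [show (b :: (q' ++ [y, z]) : List (List Char)) = (b :: q') ++ [y, z] from rfl]
      rw [ih (by simp), PySem.Chars.join_cons_cons]
      simp

theorem pv_main (s : String) :
    remove_characters_until_two_spaces s = remove_characters_until_two_spaces_alt s := by
  unfold remove_characters_until_two_spaces remove_characters_until_two_spaces_alt
  set cs := s.toList with hcs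
  have hlen : PySem.Str.len s = (cs.length : Int) := by simp [hcs]
  have hsep : (" " : String).toList = [' '] := by decide
  rw [hlen, hsep, pvSplitOn_eq]
  have hloop := pv_loop_zero cs cs.length (le_refl _)
  rw [show (cs.length : Int) - 1 = ((cs.length : Nat) : Int) - 1 from rfl, hloop]
  have hjoin := pvSplit_join cs
  have hnosp := pvSplit_no_space cs
  by_cases h3 : (pvSplit cs).length < 3
  · -- fewer than two spaces: both sides return the string
    have hb : (List.map String.ofList (pvSplit cs)).length < 3 := by simpa using h3
    conv_rhs => rw [if_pos hb]
    obtain ⟨p, pt, hp0⟩ : ∃ p pt, pvSplit cs = p :: pt := by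
      cases h : pvSplit cs with
      | nil => exact absurd h (pvSplit_ne_nil cs)
      | cons a t => exact ⟨a, t, rfl⟩
    cases pt with
    | nil =>
      -- no space at all: cs = p, space-free
      have hcsp : cs = p := by rw [← hjoin, hp0, PySem.Chars.join_singleton]
      have hns : ' ' ∉ cs := hcsp ▸ hnosp p (hp0 ▸ List.mem_cons_self)
      rw [dif_pos (pvLsb_no_space cs hns cs.length)]
      norm_num
    | cons q qt =>
      cases qt with
      | cons r rt =>
        rw [hp0] at h3
        simp at h3
        omega
      | nil =>
        -- exactly one space: cs = p ++ ' ' :: q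
        have hcsp : cs = p ++ ' ' :: q := by
          rw [← hjoin, hp0, PySem.Chars.join_cons_cons, PySem.Chars.join_singleton]
          simp
        have hnp : ' ' ∉ p := hnosp p (hp0 ▸ List.mem_cons_self)
        have hnq : ' ' ∉ q := hnosp q (hp0 ▸ List.mem_cons_of_mem _ List.mem_cons_self)
        have hL : pvLsb cs cs.length = p.length := by
          rw [hcsp, (by simp; omega : (p ++ ' ' :: q).length = p.length + 1 + q.length)]
          exact pvLsb_boundary p q hnq
        rw [dif_neg (by rw [hL]; omega)]
        have hS : pvLsb cs (pvLsb cs cs.length).toNat = -1 := by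
          rw [hL]
          rw [show ((p.length : Int)).toNat = p.length by omega]
          rw [← pvLsb_take cs p.length p.length (le_refl _)]
          rw [(by rw [hcsp]; simp : cs.take p.length = p)]
          exact pvLsb_no_space p hnp p.length
        rw [if_pos hS]
        norm_num
  · -- at least two spaces
    rw [not_lt] at h3
    have hb : ¬ (List.map String.ofList (pvSplit cs)).length < 3 := by simpa using not_lt.mpr h3
    conv_rhs => rw [if_neg hb]
    -- decompose parts = q ++ [y, z] with q ≠ []
    obtain ⟨t1, z, ht1⟩ : ∃ t1 z, pvSplit cs = t1 ++ [z] := by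
      rcases List.eq_nil_or_concat (pvSplit cs) with h | ⟨t, z, h⟩
      · exact absurd h (pvSplit_ne_nil cs)
      · exact ⟨t, z, by simpa using h⟩
    obtain ⟨q, y, hq⟩ : ∃ q y, t1 = q ++ [y] := by
      rcases List.eq_nil_or_concat t1 with h | ⟨t, y, h⟩
      · rw [h] at ht1; rw [ht1] at h3; simp at h3
      · exact ⟨t, y, by simpa using h⟩
    have hparts : pvSplit cs = q ++ [y, z] := by rw [ht1, hq]; simp
    have hqne : q ≠ [] := by
      intro h; rw [h] at hparts; rw [hparts] at h3; simp at h3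
    set J := PySem.Chars.join [' '] q with hJ
    have hdec : cs = (J ++ ' ' :: y) ++ ' ' :: z := by
      rw [← hjoin, hparts, pv_join_append2 q y z hqne, hJ]
      simp
    have hny : ' ' ∉ y := hnosp y (by rw [hparts]; simp)
    have hnz : ' ' ∉ z := hnosp z (by rw [hparts]; simp)
    have hL : pvLsb cs cs.length = ((J ++ ' ' :: y).length : Int) := by
      rw [hdec, (by simp; omega : ((J ++ ' ' :: y) ++ ' ' :: z).length = (J ++ ' ' :: y).length + 1 + z.length)]
      exact pvLsb_boundary _ z hnz
    have hS : pvLsb cs (pvLsb cs cs.length).toNat = (J.length : Int) := by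
      rw [hL, Int.toNat_natCast]
      rw [← pvLsb_take cs (J ++ ' ' :: y).length _ (le_refl _)]
      rw [(by rw [hdec]; exact List.take_left : cs.take (J ++ ' ' :: y).length = J ++ ' ' :: y)]
      rw [(by simp; omega : (J ++ ' ' :: y).length = J.length + 1 + y.length)]
      exact pvLsb_boundary J y hny
    have hLne : ¬ (pvLsb cs cs.length = -1) := by rw [hL]; omega
    have hSne : ¬ (pvLsb cs (pvLsb cs cs.length).toNat = -1) := by rw [hS]; omega
    rw [dif_neg hLne, if_neg hSne]
    rw [hS]
    norm_num
    -- A's output: slice to J.length = J; B's output: join of q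
    apply String.toList_inj.mp
    rw [PySem.Str.toList_slice, PySem.Chars.slice_eq_listSlice,
        PySem.List.slice_to _ (by positivity)]
    rw [Int.toNat_natCast]
    rw [(by rw [hdec]; simp : cs.take J.length = J)]
    rw [PySem.Str.toList_join]
    rw [pv_slice_neg2 _ (by rw [hparts]; simp)]
    rw [hparts]
    rw [(by simp : (List.map String.ofList (q ++ [y, z])).length = q.length + 2)]
    rw [show q.length + 2 - 2 = q.length by omega]
    rw [(by simp : List.map String.ofList (q ++ [y, z]) = List.map String.ofList q ++ [String.ofList y, String.ofList z])]
    rw [List.take_append_of_le_length (by simp)]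
    rw [List.take_of_length_le (by simp)]
    rw [hsep]
    rw [show List.map String.toList (List.map String.ofList q) = q from by
      simp [Function.comp_def]]

-- ===== VERDICT (by name: the statement is the Claim_ definition above) =====
theorem remove_characters_until_two_spaces_spec : Claim_equal_remove_characters_until_two_spaces := by
  intro s _
  unfold Spec_remove_characters_until_two_spaces
  exact pv_main s
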